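-- pv_equiv track=rewrite | github.com/YoungAndRichJS/Python | Coding Python Everyday/LAB06/Challenge06_01.py | ubbi_dubbi
-- ===== SOURCE A (Python) =====
-- def ubbi_dubbi(word):
--     output = []
--     for letter in word:
--         if letter.lower() in "aeiou":
--             if letter.isupper():
--                 output.append(f"UB{letter}")
--             else:
--                 output.append(f"ub{letter}")
--         else:
--             output.append(letter)
--     return "".join(output)
-- ===== SOURCE B (Python) =====
-- import re
--
-- _VOWEL = re.compile(r"[aeiouAEIOU]")
--
-- def _repl(m):
--     v = m.group()
--     return ("UB" if v.isupper() else "ub") + v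
--
-- def ubbi_dubbi(word):
--     return _VOWEL.sub(_repl, word)
-- ===== Notes on version B (the rewrite author's own statement) =====
-- stated objective: idiomatic
-- what changed: Replaces the explicit per-character loop, membership test and output list with a single compiled re.sub over the vowel character class, a callback supplying the ub/UB prefix per match.
import Mathlib
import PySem

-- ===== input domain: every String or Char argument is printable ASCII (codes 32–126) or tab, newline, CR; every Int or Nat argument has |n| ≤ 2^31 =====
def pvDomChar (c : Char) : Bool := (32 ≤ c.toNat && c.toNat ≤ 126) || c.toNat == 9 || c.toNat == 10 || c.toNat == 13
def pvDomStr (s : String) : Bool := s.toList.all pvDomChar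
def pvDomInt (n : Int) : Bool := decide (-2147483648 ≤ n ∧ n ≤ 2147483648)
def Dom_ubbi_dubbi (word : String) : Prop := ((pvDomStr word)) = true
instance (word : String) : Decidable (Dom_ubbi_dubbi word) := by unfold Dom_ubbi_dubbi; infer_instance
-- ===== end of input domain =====

-- B replaces A's explicit per-character loop/list with an idiomatic re.sub over the vowel class; return values proved equal on all inputs.

-- ===== PORT A =====
-- literal port: loop over characters, append a string per character to `output`, then "".join
def ubbi_dubbi (word : String) : String :=
  let output : List String :=
    word.toList.foldl (fun output letter =>
      if PySem.Chars.isIn [PySem.Chars.lowerChar letter] "aeiou".toList = true then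
        if PySem.Chars.isupper letter = true then
          output ++ ["UB" ++ String.ofList [letter]]
        else
          output ++ ["ub" ++ String.ofList [letter]]
      else
        output ++ [String.ofList [letter]]) []
  String.join output

-- ===== PORT B =====
-- port of Source B's re.sub(r"[aeiouAEIOU]", _repl, word): the single-character class matches
-- exactly the characters in "aeiouAEIOU"; each match is replaced by _repl's value and
-- non-matching characters are copied through, i.e. a flat map of the callback over the string.
def ubbiRepl (m : Char) : String :=
  if PySem.Chars.isIn [m] "aeiouAEIOU".toList = true then
    (if PySem.Chars.isupper m = true then "UB" else "ub") ++ String.ofList [m]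
  else
    String.ofList [m]

def ubbi_dubbi_alt (word : String) : String :=
  String.join (word.toList.map ubbiRepl)

-- ===== PRECONDITION & SPEC =====
def Spec_ubbi_dubbi (word : String) (out : String) : Prop := out = ubbi_dubbi_alt word
instance (word : String) (out : String) : Decidable (Spec_ubbi_dubbi word out) := by unfold Spec_ubbi_dubbi; infer_instance

-- ===== CLAIM (what is proved, stated in full; the proofs are below) =====
def Claim_equal_ubbi_dubbi : Prop := ∀ (word : String), Dom_ubbi_dubbi word → Spec_ubbi_dubbi word (ubbi_dubbi word)

-- ===== LEMMAS AND PROOFS =====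

theorem pv_char_eq_iff (c d : Char) : c = d ↔ c.toNat = d.toNat := by
  constructor
  · rintro rfl; rfl
  · intro h; exact Char.ext (UInt32.toNat_inj.mp h)

theorem pv_toNat_ofNat (n : Nat) (h : n < 55296) : (Char.ofNat n).toNat = n := by
  unfold Char.ofNat
  rw [dif_pos (Or.inl h : Nat.isValidChar n)]
  simp [Char.ofNatAux, Char.toNat]

theorem pv_join_cons (x : String) (xs : List String) :
    String.join (x :: xs) = x ++ String.join xs := by
  induction xs generalizing x with
  | nil => simp [String.join]
  | cons y ys ih =>
      calc String.join (x :: y :: ys) = String.join ((x ++ y) :: ys) := by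
              simp [String.join, List.foldl_cons]
        _ = (x ++ y) ++ String.join ys := ih _
        _ = x ++ String.join (y :: ys) := by rw [ih y, String.append_assoc]

theorem pv_join_append (a b : List String) :
    String.join (a ++ b) = String.join a ++ String.join b := by
  induction a with
  | nil => simp [String.join]
  | cons x xs ih => simp [pv_join_cons, ih, String.append_assoc]

-- the two membership tests agree on every character
theorem pv_mem_lower (c : Char) :
    PySem.Chars.isIn [PySem.Chars.lowerChar c] "aeiou".toList
      = PySem.Chars.isIn [c] "aeiouAEIOU".toList := by
  have e5 : "aeiou".toList = ['a','e','i','o','u'] := by decide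
  have e10 : "aeiouAEIOU".toList = ['a','e','i','o','u','A','E','I','O','U'] := by decide
  by_cases hc : c ∈ ['a','e','i','o','u','A','E','I','O','U']
  · fin_cases hc <;> decide
  · have hR : PySem.Chars.isIn [c] "aeiouAEIOU".toList = false := by
      rw [PySem.Chars.isIn_eq_false_iff, List.singleton_infix_iff, e10]
      simpa using hc
    have hL : PySem.Chars.isIn [PySem.Chars.lowerChar c] "aeiou".toList = false := by
      rw [PySem.Chars.isIn_eq_false_iff, List.singleton_infix_iff, e5]
      intro hmem
      apply hc
      unfold PySem.Chars.lowerChar at hmem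
      by_cases hu : PySem.Chars.isupper c = true
      · rw [if_pos hu] at hmem
        have hb : 65 ≤ c.toNat ∧ c.toNat ≤ 90 := by
          have h2 : ((65 ≤ c.toNat) && (c.toNat ≤ 90)) = true := by
            rw [show ((65 ≤ c.toNat) && (c.toNat ≤ 90)) = PySem.Chars.isupper c from rfl]
            exact hu
          simpa using h2
        have hN : (Char.ofNat (c.toNat + 32)).toNat = c.toNat + 32 :=
          pv_toNat_ofNat _ (by omega)
        have va : ('a' : Char).toNat = 97 := rfl
        have ve : ('e' : Char).toNat = 101 := rfl
        have vi : ('i' : Char).toNat = 105 := rfl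
        have vo : ('o' : Char).toNat = 111 := rfl
        have vu : ('u' : Char).toNat = 117 := rfl
        have vA : ('A' : Char).toNat = 65 := rfl
        have vE : ('E' : Char).toNat = 69 := rfl
        have vI : ('I' : Char).toNat = 73 := rfl
        have vO : ('O' : Char).toNat = 79 := rfl
        have vU : ('U' : Char).toNat = 85 := rfl
        simp only [List.mem_cons, List.not_mem_nil, or_false] at hmem ⊢
        rcases hmem with h | h | h | h | h <;>
          (rw [pv_char_eq_iff, hN] at h) <;>
          simp only [pv_char_eq_iff, va, ve, vi, vo, vu, vA, vE, vI, vO, vU] at h ⊢ <;> omega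
      · rw [if_neg hu] at hmem
        simp only [List.mem_cons, List.not_mem_nil, or_false] at hmem ⊢
        tauto
    rw [hL, hR]

-- A's per-character contribution equals B's callback value
theorem pv_charStep (c : Char) :
    (if PySem.Chars.isIn [PySem.Chars.lowerChar c] "aeiou".toList = true then
      if PySem.Chars.isupper c = true then "UB" ++ String.ofList [c] else "ub" ++ String.ofList [c]
     else String.ofList [c]) = ubbiRepl c := by
  rw [pv_mem_lower]
  unfold ubbiRepl
  split_ifs <;> rfl

theorem pv_join_foldl (cs : List Char) (acc : List String) :
    String.join (cs.foldl (fun out c => out ++ [ubbiRepl c]) acc)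
      = String.join acc ++ String.join (cs.map ubbiRepl) := by
  induction cs generalizing acc with
  | nil => simp [String.join]
  | cons c cs ih =>
      simp only [List.foldl_cons, List.map_cons]
      rw [ih, pv_join_append, pv_join_cons, pv_join_cons]
      have j0 : String.join ([] : List String) = "" := rfl
      rw [j0, String.append_assoc]
      simp

-- ===== VERDICT (by name: the statement is the Claim_ definition above) =====
theorem ubbi_dubbi_spec : Claim_equal_ubbi_dubbi := by
  intro word _
  unfold Spec_ubbi_dubbi ubbi_dubbi ubbi_dubbi_alt
  have hfun : (fun (output : List String) (letter : Char) =>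
      if PySem.Chars.isIn [PySem.Chars.lowerChar letter] "aeiou".toList = true then
        if PySem.Chars.isupper letter = true then
          output ++ ["UB" ++ String.ofList [letter]]
        else
          output ++ ["ub" ++ String.ofList [letter]]
      else
        output ++ [String.ofList [letter]])
      = (fun (out : List String) (c : Char) => out ++ [ubbiRepl c]) := by
    funext out c
    rw [← pv_charStep c]
    split_ifs <;> rfl
  rw [hfun, pv_join_foldl]
  simp [String.join]
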